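-- pv_equiv track=rewrite | github.com/stefanhillmann/dicodis | src/common/ngram/model_generator.py | create_rank_model
-- ===== SOURCE A (Python) =====
-- def create_rank_model(frequencies_model):
--     # create a list of all unique frequency values
--     unique_frequencies = list(set( list(frequencies_model.values()) ))
--
--     # order this list downward
--     unique_frequencies = sorted(unique_frequencies, reverse=True)
--
--     # create ordered list of all possible ranks (1 to number of unique frequencies)
--     ranks = list(range(1, len(unique_frequencies) + 1))
--
--     # zip unique freq. and ranks together -> highest frequency will be related to lowest rank (i.e. 1) and so on
--     rank_dict = dict(zip(unique_frequencies, ranks))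
--
--     # build rank model
--     rank_model = {}
--     for n_gram in frequencies_model.keys():
--         frequency = frequencies_model[n_gram]  # get frequency of n_gram
--         rank = rank_dict[frequency]            # get the rank of frequency
--         rank_model[n_gram] = rank              # put n_gram and rank in rank_model
--
--     return rank_model
-- ===== SOURCE B (Python) =====
-- def create_rank_model(frequencies_model):
--     # sort-free dense ranking: the rank of an n-gram is one plus the number of
--     # DISTINCT frequency values strictly greater than its own frequency
--     uniq = set(frequencies_model.values())
--     return {g: 1 + sum(1 for u in uniq if u > f)
--             for g, f in frequencies_model.items()}
-- ===== Notes on version B (the rewrite author's own statement) =====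
-- stated objective: alternative
-- what changed: Drops A's sorting and rank-table construction entirely: B computes each n-gram's dense rank directly as 1 + the count of distinct frequency values strictly greater than its own, by scanning the set of unique frequencies per item.
import Mathlib
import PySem

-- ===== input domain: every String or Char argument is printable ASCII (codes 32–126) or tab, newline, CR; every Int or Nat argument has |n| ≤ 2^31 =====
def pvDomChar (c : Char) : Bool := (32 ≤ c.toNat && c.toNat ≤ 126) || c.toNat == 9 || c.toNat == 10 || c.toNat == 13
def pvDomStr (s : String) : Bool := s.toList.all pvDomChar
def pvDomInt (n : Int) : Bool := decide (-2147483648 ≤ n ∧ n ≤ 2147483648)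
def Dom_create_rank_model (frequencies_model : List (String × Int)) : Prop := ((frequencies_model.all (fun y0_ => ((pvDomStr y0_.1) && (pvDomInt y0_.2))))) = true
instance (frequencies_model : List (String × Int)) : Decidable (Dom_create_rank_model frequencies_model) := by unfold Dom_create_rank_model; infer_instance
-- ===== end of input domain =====

-- B drops A's sort and rank table: each n-gram's dense rank is computed directly as
-- 1 + the count of distinct frequencies strictly greater than its own; objective: alternative.

-- ===== PORT A =====
-- 'rank_dict[frequency]' can never raise KeyError (every frequency is in the set the dict was
-- built from), so the total '(… .get? …).getD 0' is exact; the default 0 is never used.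
def create_rank_model (frequencies_model : List (String × Int)) : List (String × Int) :=
  let unique_frequencies := PySem.Set.ofList (frequencies_model.map Prod.snd)
  let sortedu := PySem.List.sorted unique_frequencies (fun x => x) true
  let ranks := PySem.List.pyRange 1 ((sortedu.length : Int) + 1) 1
  let rank_dict := PySem.Dict.ofList (sortedu.zip ranks)
  (frequencies_model.foldl (fun (rm : PySem.Dict String Int) p =>
      rm.insert p.1 ((rank_dict.get? p.2).getD 0)) PySem.Dict.empty).items

-- ===== PORT B =====
-- 'sum(1 for u in uniq if u > f)' is the foldl counter; the dict comprehension is the foldl insert.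
def create_rank_model_alt (frequencies_model : List (String × Int)) : List (String × Int) :=
  let uniq := PySem.Set.ofList (frequencies_model.map Prod.snd)
  (frequencies_model.foldl (fun (rm : PySem.Dict String Int) p =>
      rm.insert p.1 (1 + uniq.foldl (fun (acc : Int) u => if p.2 < u then acc + 1 else acc) 0))
    PySem.Dict.empty).items

-- ===== PRECONDITION & SPEC =====
def Spec_create_rank_model (frequencies_model : List (String × Int)) (out : List (String × Int)) : Prop := out = create_rank_model_alt frequencies_model
instance (frequencies_model : List (String × Int)) (out : List (String × Int)) : Decidable (Spec_create_rank_model frequencies_model out) := by unfold Spec_create_rank_model; infer_instance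

-- ===== CLAIM (what is proved, stated in full; the proofs are below) =====
def Claim_equal_create_rank_model : Prop := ∀ (frequencies_model : List (String × Int)), Dom_create_rank_model frequencies_model → Spec_create_rank_model frequencies_model (create_rank_model frequencies_model)

-- ===== LEMMAS AND PROOFS =====
-- Both sides are shown to assign to each n-gram the same closed-form value:
-- 1 + the number of DISTINCT frequencies strictly greater than its own (dense rank).

-- range(1, n+1) as a shifted map over List.range
lemma pyRange_shift (n : Nat) : ∀ (a : Int),
    PySem.List.pyRange a (a + n) 1 = (List.range n).map (fun (j : Nat) => a + (j : Int)) := by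
  induction n with
  | zero => intro a; simp [PySem.List.pyRange_one_eq_nil]
  | succ m ih =>
    intro a
    rw [PySem.List.pyRange_one_cons (by omega)]
    have h1 : a + (m + 1 : Nat) = (a + 1) + (m : Nat) := by push_cast; ring
    rw [h1, ih (a+1), List.range_succ_eq_map, List.map_cons, List.map_map]
    congr 1
    · simp
    · apply List.map_congr_left; intro x hx; simp [Function.comp]; ring

-- in a strictly decreasing list, the elements greater than s[i] are exactly the first i
lemma filter_len_of_pairwise_gt : ∀ (s : List Int), s.Pairwise (fun a b => b < a) →
    ∀ i (h : i < s.length), (s.filter (fun v => decide (s[i] < v))).length = i := by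
  intro s hs
  induction s with
  | nil => intro i h; simp at h
  | cons a t ih =>
    intro i h
    rcases List.pairwise_cons.mp hs with ⟨hall, ht⟩
    cases i with
    | zero =>
      simp only [List.getElem_cons_zero, List.filter_cons]
      rw [if_neg (by simp)]
      simp only [List.length_eq_zero_iff]
      rw [List.filter_eq_nil_iff]
      intro x hx
      have := hall x hx
      simp; omega
    | succ j =>
      simp only [List.getElem_cons_succ, List.filter_cons]
      have hj : j < t.length := by simpa using h
      rw [if_pos (by simp [hall t[j] (List.getElem_mem hj)])]
      simp only [List.length_cons]
      exact congrArg Nat.succ (ih ht j hj)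

-- A's rank-dict lookup equals 1 + the number of distinct greater values
lemma rank_eq (vals : List Int) (f : Int) (hf : f ∈ vals) :
    ((PySem.Dict.ofList ((PySem.List.sorted (PySem.Set.ofList vals) (fun x => x) true).zip
        (PySem.List.pyRange 1 (((PySem.List.sorted (PySem.Set.ofList vals) (fun x => x) true).length : Int) + 1) 1))).get? f).getD 0
      = 1 + ((PySem.Set.ofList (vals.filter (fun v => f < v))).length : Int) := by
  set u := PySem.Set.ofList vals with hu
  set s := PySem.List.sorted u (fun x => x) true with hsdef
  have hperm : s.Perm u := PySem.List.sorted_perm ..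
  have hnodup : s.Nodup := hperm.nodup_iff.mpr (PySem.Set.nodup_ofList vals)
  have hpair : s.Pairwise (fun a b => b < a) := by
    have h1 : s.Pairwise (fun a b => (fun x => x) b ≤ (fun x => x) a) := PySem.List.sorted_pairwise_rev ..
    exact (h1.and hnodup).imp (fun h => lt_of_le_of_ne h.1 (Ne.symm h.2))
  have hranks : PySem.List.pyRange 1 ((s.length : Int) + 1) 1
      = (List.range s.length).map (fun (j : Nat) => 1 + (j : Int)) := by
    rw [show ((s.length : Int) + 1) = 1 + (s.length : Nat) by ring]
    exact pyRange_shift s.length 1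
  have hlen : (PySem.List.pyRange 1 ((s.length : Int) + 1) 1).length = s.length := by
    rw [hranks]; simp
  have hfs : f ∈ s := (PySem.List.mem_sorted ..).mpr ((PySem.Set.mem_ofList ..).mpr hf)
  obtain ⟨i, hi, hgi⟩ := List.getElem_of_mem hfs
  have hmapfst : ((s.zip (PySem.List.pyRange 1 ((s.length : Int) + 1) 1)).map Prod.fst) = s :=
    List.map_fst_zip (by rw [hlen])
  have hitems : (PySem.Dict.ofList (s.zip (PySem.List.pyRange 1 ((s.length : Int) + 1) 1))).items
      = s.zip (PySem.List.pyRange 1 ((s.length : Int) + 1) 1) := by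
    have := PySem.Dict.items_foldl_insert_fresh
      (s.zip (PySem.List.pyRange 1 ((s.length : Int) + 1) 1)) Prod.fst Prod.snd PySem.Dict.empty
      (fun a _ => PySem.Dict.contains_empty ..) (by rw [hmapfst]; exact hnodup)
    simpa using this
  have hkeys : (PySem.Dict.ofList (s.zip (PySem.List.pyRange 1 ((s.length : Int) + 1) 1))).keys.Nodup := by
    simp only [PySem.Dict.keys]
    rw [hitems, hmapfst]; exact hnodup
  have hpairmem : (f, 1 + (i : Int)) ∈ s.zip (PySem.List.pyRange 1 ((s.length : Int) + 1) 1) := by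
    have hi2 : i < (s.zip (PySem.List.pyRange 1 ((s.length : Int) + 1) 1)).length := by
      rw [List.length_zip, hlen]; omega
    have hz : (s.zip (PySem.List.pyRange 1 ((s.length : Int) + 1) 1))[i]
        = (s[i], (PySem.List.pyRange 1 ((s.length : Int) + 1) 1)[i]'(by rw [hlen]; omega)) := List.getElem_zip
    rw [← hgi, show (1 + (i : Int)) = (PySem.List.pyRange 1 ((s.length : Int) + 1) 1)[i]'(by rw [hlen]; omega) by simp [hranks]]
    exact hz ▸ List.getElem_mem hi2
  have hget : (PySem.Dict.ofList (s.zip (PySem.List.pyRange 1 ((s.length : Int) + 1) 1))).get? f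
      = some (1 + (i : Int)) :=
    PySem.Dict.get?_of_mem_items _ (by rw [hitems]; exact hpairmem) hkeys
  rw [hget]
  simp only [Option.getD_some]
  congr 1
  have e1 : (s.filter (fun v => decide (f < v))).length = i := by
    rw [← hgi]; exact filter_len_of_pairwise_gt s hpair i hi
  have e2 : (PySem.Set.ofList (vals.filter (fun v => f < v))).Perm (s.filter (fun v => decide (f < v))) := by
    apply List.perm_of_nodup_nodup_toFinset_eq (PySem.Set.nodup_ofList _) (hnodup.filter _)
    ext x
    simp only [List.mem_toFinset, PySem.Set.mem_ofList, List.mem_filter]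
    rw [PySem.List.mem_sorted, PySem.Set.mem_ofList]
  rw [e2.length_eq, e1]

-- the counting fold equals the length of the corresponding filter
lemma foldl_count_eq_filter_length (f : Int) : ∀ (l : List Int) (acc : Int),
    l.foldl (fun (a : Int) u => if f < u then a + 1 else a) acc
      = acc + ((l.filter (fun u => decide (f < u))).length : Int) := by
  intro l
  induction l with
  | nil => intro acc; simp
  | cons a t ih =>
    intro acc
    simp only [List.foldl_cons, List.filter_cons]
    by_cases h : f < a
    · rw [if_pos h, if_pos (by simpa using h), ih]
      simp; ring
    · rw [if_neg h, if_neg (by simpa using h), ih]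

-- B's per-item count equals the same closed form as A's rank lookup
lemma count_eq (vals : List Int) (f : Int) :
    (PySem.Set.ofList vals).foldl (fun (a : Int) u => if f < u then a + 1 else a) 0
      = ((PySem.Set.ofList (vals.filter (fun v => f < v))).length : Int) := by
  rw [foldl_count_eq_filter_length, zero_add]
  congr 1
  have e : (PySem.Set.ofList (vals.filter (fun v => f < v))).Perm
      ((PySem.Set.ofList vals).filter (fun u => decide (f < u))) := by
    apply List.perm_of_nodup_nodup_toFinset_eq (PySem.Set.nodup_ofList _)
      ((PySem.Set.nodup_ofList _).filter _)
    ext x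
    simp only [List.mem_toFinset, PySem.Set.mem_ofList, List.mem_filter, PySem.Set.mem_ofList]
  exact e.length_eq.symm

-- ===== VERDICT (by name: the statement is the Claim_ definition above) =====
theorem create_rank_model_spec : Claim_equal_create_rank_model := by
  intro fm _
  show create_rank_model fm = create_rank_model_alt fm
  unfold create_rank_model create_rank_model_alt
  dsimp only
  congr 1
  apply PySem.List.foldl_congr_mem
  intro acc p hp
  congr 1
  rw [rank_eq (fm.map Prod.snd) p.2 (List.mem_map_of_mem hp), count_eq (fm.map Prod.snd) p.2]
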